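-- pv_equiv track=rewrite | github.com/rmei6/DS-A | Air_Invaders.py | maxPlanes
-- ===== SOURCE A (Python) =====
-- import math
--
-- def maxPlanes(startHeight, descentRate):
--     # Write your code here
--     time_to_impact = []
--     for i, num in enumerate(startHeight):
--         time_to_impact.append(math.ceil(num / descentRate[i]))
--     time_to_impact = sorted(time_to_impact)
--     current_time = 0
--     planes_shot = 0
--     for time in time_to_impact:
--         if time <= current_time:
--             return planes_shot
--         planes_shot += 1
--         current_time += 1
--     return planes_shot
-- ===== SOURCE B (Python) =====
-- def maxPlanes(startHeight, descentRate):
--     # Counting buckets + prefix-sum sweep: no sort, no floats.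
--     n = len(startHeight)
--     cnt = [0] * (n + 1)
--     for h, r in zip(startHeight, descentRate):
--         t = -(-h // r)               # exact integer ceil(h / r)
--         cnt[min(max(t, 0), n)] += 1  # clamp: only the order of times below n matters
--     running = 0
--     for j in range(n):
--         running += cnt[j]
--         if running > j:              # the (j+1)-th smallest impact time is <= j
--             return j
--     return n
-- ===== Notes on version B (the rewrite author's own statement) =====
-- stated objective: alternative
-- what changed: Replaces sort-then-scan-with-early-return by a counting-bucket pass plus a prefix-sum sweep that returns the first index j whose running count exceeds j; uses exact integer ceiling division instead of float math.ceil.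
import Mathlib
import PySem

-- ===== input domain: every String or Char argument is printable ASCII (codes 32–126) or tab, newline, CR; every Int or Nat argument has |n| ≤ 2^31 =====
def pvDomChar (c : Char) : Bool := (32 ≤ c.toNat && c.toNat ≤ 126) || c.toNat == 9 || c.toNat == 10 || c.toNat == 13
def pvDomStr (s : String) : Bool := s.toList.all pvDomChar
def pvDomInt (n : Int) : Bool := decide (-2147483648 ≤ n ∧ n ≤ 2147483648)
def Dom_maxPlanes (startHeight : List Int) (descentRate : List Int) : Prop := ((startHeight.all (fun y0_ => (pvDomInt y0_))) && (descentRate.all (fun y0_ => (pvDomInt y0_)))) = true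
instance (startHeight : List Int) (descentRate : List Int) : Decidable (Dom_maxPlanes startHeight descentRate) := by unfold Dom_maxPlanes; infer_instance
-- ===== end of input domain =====

-- B replaces A's sort + early-exit scan by counting buckets with a prefix-sum sweep (alternative algorithm).


-- ===== PORT A =====
-- math.ceil(num / descentRate[i]): on Dom (|values| ≤ 2^31 < 2^53) the float division is correctly
-- rounded and its ceiling equals exact integer ceiling division -((-num) // d), ported as such.
def ceilA (a b : Int) : Int := -(PySem.Int.floordiv (-a) b)

-- for i, num in enumerate(startHeight): time_to_impact.append(math.ceil(num / descentRate[i]))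
def timesA (startHeight descentRate : List Int) : List Int :=
  (PySem.List.enumerate startHeight 0).map
    (fun p => ceilA p.2 (PySem.List.pyGetD descentRate p.1 0))

-- for time in time_to_impact: if time <= current_time: return planes_shot; planes_shot += 1; current_time += 1
def shootLoop : List Int → Int → Int → Int
  | [], _, planes => planes
  | t :: rest, cur, planes =>
      if t ≤ cur then planes else shootLoop rest (cur + 1) (planes + 1)

def maxPlanes (startHeight : List Int) (descentRate : List Int) : Int :=
  shootLoop (PySem.List.sorted (timesA startHeight descentRate) (fun x => x) false) 0 0

-- ===== PORT B =====
def ceilB (h r : Int) : Int := -(PySem.Int.floordiv (-h) r)   -- -(-h // r)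

def clampB (t : Int) (n : Nat) : Nat := (min (max t 0) (n : Int)).toNat   -- min(max(t, 0), n)

-- for h, r in zip(startHeight, descentRate): cnt[min(max(-(-h // r), 0), n)] += 1
def buildCnt (pairs : List (Int × Int)) (n : Nat) : List Int :=
  pairs.foldl
    (fun c p =>
      let k := clampB (ceilB p.1 p.2) n
      c.set k (c.getD k 0 + 1))
    (List.replicate (n + 1) 0)

-- for j in range(n): running += cnt[j]; if running > j: return j   /  return n
def sweep (n : Nat) : List Int → Nat → Int → Int
  | [], _, _ => (n : Int)
  | c :: rest, j, running =>
      let running' := running + c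
      if (j : Int) < running' then (j : Int) else sweep n rest (j + 1) running'

def maxPlanes_alt (startHeight : List Int) (descentRate : List Int) : Int :=
  let n := startHeight.length
  let cnt := buildCnt (startHeight.zip descentRate) n
  sweep n (cnt.take n) 0 0

-- ===== PRECONDITION & SPEC =====
-- Pre_ excludes exactly the inputs where A raises: descentRate shorter than startHeight (IndexError)
-- or a zero rate among the used entries (ZeroDivisionError).
def Pre_maxPlanes (startHeight : List Int) (descentRate : List Int) : Prop :=
  startHeight.length ≤ descentRate.length ∧ ∀ r ∈ descentRate.take startHeight.length, r ≠ 0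
instance (startHeight : List Int) (descentRate : List Int) : Decidable (Pre_maxPlanes startHeight descentRate) := by unfold Pre_maxPlanes; infer_instance

def pvWitness_maxPlanes : List Int × List Int := ([9, 3, 5, 7], [1, 2, 2, 2])

def Spec_maxPlanes (startHeight : List Int) (descentRate : List Int) (out : Int) : Prop := out = maxPlanes_alt startHeight descentRate
instance (startHeight : List Int) (descentRate : List Int) (out : Int) : Decidable (Spec_maxPlanes startHeight descentRate out) := by unfold Spec_maxPlanes; infer_instance

-- ===== CLAIM (what is proved, stated in full; the proofs are below) =====
def Claim_equal_maxPlanes : Prop := ∀ (startHeight : List Int) (descentRate : List Int), Dom_maxPlanes startHeight descentRate → Pre_maxPlanes startHeight descentRate → Spec_maxPlanes startHeight descentRate (maxPlanes startHeight descentRate)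

-- ===== LEMMAS AND PROOFS =====

-- The common specification: both programs return (the cast of) the first j with
-- j < #{t ∈ ts : t ≤ j} — the (j+1)-th smallest impact time is ≤ j — or ts.length if none exists.
def PcP (ts : List Int) (j : Nat) : Prop := j < ts.countP (fun t => decide (t ≤ (j : Int)))

def IsSpec (ts : List Int) (m : Int) : Prop :=
  ∃ j : Nat, m = (j : Int) ∧ j ≤ ts.length ∧ (∀ i < j, ¬ PcP ts i) ∧ (j < ts.length → PcP ts j)

theorem IsSpec_unique {ts : List Int} {m m' : Int} (h : IsSpec ts m) (h' : IsSpec ts m') : m = m' := by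
  obtain ⟨j, rfl, hle, hno, hyes⟩ := h
  obtain ⟨j', rfl, hle', hno', hyes'⟩ := h'
  rcases Nat.lt_trichotomy j j' with hlt | rfl | hlt
  · exact absurd (hyes (lt_of_lt_of_le hlt hle')) (hno' _ hlt)
  · rfl
  · exact absurd (hyes' (lt_of_lt_of_le hlt hle)) (hno _ hlt)

-- A's time list is the ceiling map over the zipped inputs.
theorem timesA_eq (sh dr : List Int) (hlen : sh.length ≤ dr.length) :
    timesA sh dr = (sh.zip dr).map (fun p => ceilA p.1 p.2) := by
  unfold timesA
  apply List.ext_getElem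
  · simp [PySem.List.length_enumerate]; omega
  · intro i h1 h2
    have hi : i < sh.length := by simpa [PySem.List.length_enumerate] using h1
    have hid : i < dr.length := lt_of_lt_of_le hi hlen
    simp [PySem.List.getElem_enumerate, PySem.List.pyGetD_natCast, List.getD_eq_getElem?_getD,
      hid, List.getElem_zip]

-- On a sorted list: s[j] ≤ x  ↔  more than j elements of s are ≤ x.
theorem sorted_getElem_le_iff {s : List Int} (hs : s.Pairwise (· ≤ ·)) (j : Nat) (hj : j < s.length)
    (x : Int) : s[j] ≤ x ↔ j < s.countP (fun t => decide (t ≤ x)) := by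
  have hpw := List.pairwise_iff_getElem.mp hs
  constructor
  · intro h
    have hsplit : s.countP (fun t => decide (t ≤ x)) =
        (s.take (j+1)).countP (fun t => decide (t ≤ x)) + (s.drop (j+1)).countP (fun t => decide (t ≤ x)) := by
      conv_lhs => rw [← List.take_append_drop (j+1) s]
      exact List.countP_append ..
    have hlen : (s.take (j+1)).length = j + 1 := by simp [List.length_take]; omega
    have htake : (s.take (j+1)).countP (fun t => decide (t ≤ x)) = (s.take (j+1)).length := by
      rw [List.countP_eq_length]
      intro a ha
      obtain ⟨i, hi, rfl⟩ := List.mem_iff_getElem.mp ha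
      rw [List.getElem_take]
      have : s[i] ≤ s[j] := by
        rcases Nat.lt_or_ge i j with hlt | hge
        · exact hpw i j (by omega) hj hlt
        · have hij : i < j + 1 := by omega
          have : i = j := by omega
          subst this; exact le_refl _
      simpa using le_trans this h
    omega
  · intro h
    by_contra hnot
    have hx : x < s[j] := by omega
    have hdrop : (s.drop j).countP (fun t => decide (t ≤ x)) = 0 := by
      rw [List.countP_eq_zero]
      intro a ha
      obtain ⟨i, hi, rfl⟩ := List.mem_iff_getElem.mp ha
      rw [List.getElem_drop]
      have hji : j + i < s.length := by
        have := hi; simp [List.length_drop] at this; omega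
      have : s[j] ≤ s[j+i] := by
        rcases Nat.eq_or_lt_of_le (Nat.le_add_right j i) with he | hlt
        · simp [← he]
        · exact hpw j (j+i) hj hji hlt
      simp; omega
    have hsplit : s.countP (fun t => decide (t ≤ x)) =
        (s.take j).countP (fun t => decide (t ≤ x)) + (s.drop j).countP (fun t => decide (t ≤ x)) := by
      conv_lhs => rw [← List.take_append_drop j s]
      exact List.countP_append ..
    have : (s.take j).countP (fun t => decide (t ≤ x)) ≤ j := by
      calc (s.take j).countP _ ≤ (s.take j).length := List.countP_le_length
      _ ≤ j := by simp [List.length_take]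
    omega

-- A's loop on s returns a + (first index i with s[i] ≤ a + i, else s.length).
theorem shootLoop_char (s : List Int) : ∀ (a : Nat),
    ∃ k : Nat, shootLoop s (a : Int) (a : Int) = ((a : Int) + (k : Int)) ∧ k ≤ s.length ∧
      (∀ i (hi : i < s.length), i < k → ¬ (s[i] ≤ (a : Int) + (i : Int))) ∧
      (∀ hk : k < s.length, s[k] ≤ (a : Int) + (k : Int)) := by
  induction s with
  | nil => intro a; exact ⟨0, by simp [shootLoop], by simp, by simp, by simp⟩
  | cons t rest ih =>
    intro a
    by_cases ht : t ≤ (a : Int)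
    · refine ⟨0, ?_, by simp, by simp, ?_⟩
      · simp [shootLoop, ht]
      · intro hk; simpa using ht
    · obtain ⟨k, hval, hle, hno, hyes⟩ := ih (a + 1)
      refine ⟨k + 1, ?_, by simpa using hle, ?_, ?_⟩
      · have : shootLoop (t :: rest) (a : Int) (a : Int) = shootLoop rest ((a : Int) + 1) ((a : Int) + 1) := by
          simp [shootLoop, ht]
        rw [this]
        have hcast : ((a : Int) + 1) = ((a + 1 : Nat) : Int) := by push_cast; ring
        rw [hcast, hval]; push_cast; ring
      · intro i hi hik
        cases i with
        | zero => simpa using ht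
        | succ i' =>
          have hi' : i' < rest.length := by simpa using hi
          have := hno i' hi' (by omega)
          simp only [List.getElem_cons_succ]
          intro hcon; apply this; push_cast at hcon ⊢; omega
      · intro hk
        have hk' : k < rest.length := by simpa using hk
        have := hyes hk'
        simp only [List.getElem_cons_succ]
        push_cast at this ⊢; omega

theorem A_isSpec (ts : List Int) : IsSpec ts (shootLoop (PySem.List.sorted ts (fun x => x) false) 0 0) := by
  set s := PySem.List.sorted ts (fun x => x) false with hs_def
  have hperm : s.Perm ts := PySem.List.sorted_perm ..
  have hpw : s.Pairwise (· ≤ ·) := PySem.List.sorted_pairwise ..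
  have hlen : s.length = ts.length := hperm.length_eq
  have hcount : ∀ x, s.countP (fun t => decide (t ≤ x)) = ts.countP (fun t => decide (t ≤ x)) :=
    fun x => hperm.countP_eq _
  obtain ⟨k, hval, hle, hno, hyes⟩ := shootLoop_char s 0
  refine ⟨k, ?_, hlen ▸ hle, ?_, ?_⟩
  · simpa using hval
  · intro i hik
    have hi : i < s.length := by omega
    have h1 : ¬ (s[i] ≤ (i:Int)) := by have := hno i hi hik; simpa using this
    rw [sorted_getElem_le_iff hpw i hi ((i:Int))] at h1
    unfold PcP; rw [← hcount]; simpa using h1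
  · intro hk
    have hk' : k < s.length := by omega
    have h1 : s[k] ≤ (k:Int) := by have := hyes hk'; simpa using this
    rw [sorted_getElem_le_iff hpw k hk' ((k:Int))] at h1
    unfold PcP; rw [← hcount]; simpa using h1

-- ---- B side ----
theorem foldl_step_length (pairs : List (Int × Int)) (n : Nat) : ∀ (init : List Int),
    (pairs.foldl (fun c p =>
      let k := clampB (ceilB p.1 p.2) n
      c.set k (c.getD k 0 + 1)) init).length = init.length := by
  induction pairs with
  | nil => intro init; rfl
  | cons p rest ih => intro init; rw [List.foldl_cons, ih]; simp

theorem buildCnt_length (pairs : List (Int × Int)) (n : Nat) : (buildCnt pairs n).length = n + 1 := by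
  unfold buildCnt; rw [foldl_step_length]; simp

theorem getD_set_eq (l : List Int) (i : Nat) (v : Int) (h : i < l.length) :
    (l.set i v).getD i 0 = v := by
  simp [List.getD_eq_getElem?_getD, h]

theorem getD_set_ne (l : List Int) (i k : Nat) (v : Int) (h : k ≠ i) :
    (l.set i v).getD k 0 = l.getD k 0 := by
  simp [List.getD_eq_getElem?_getD, List.getElem?_set_ne (Ne.symm h)]

-- bucket k of the fold counts the pairs whose clamped time is k
theorem buildCnt_getD_aux (pairs : List (Int × Int)) (n k : Nat) (hk : k ≤ n) : ∀ (init : List Int),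
    init.length = n + 1 →
    (pairs.foldl (fun c p =>
      let k := clampB (ceilB p.1 p.2) n
      c.set k (c.getD k 0 + 1)) init).getD k 0
      = init.getD k 0 + (pairs.countP (fun p => decide (clampB (ceilB p.1 p.2) n = k)) : Int) := by
  induction pairs with
  | nil => intro init _; simp
  | cons p rest ih =>
    intro init hlen
    rw [List.foldl_cons]
    have hset_len : (init.set (clampB (ceilB p.1 p.2) n) (init.getD (clampB (ceilB p.1 p.2) n) 0 + 1)).length = n + 1 := by
      simp [hlen]
    rw [ih _ hset_len]
    rw [List.countP_cons]
    by_cases he : clampB (ceilB p.1 p.2) n = k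
    · rw [he, getD_set_eq _ _ _ (by omega)]
      simp; ring
    · rw [getD_set_ne _ _ _ _ (Ne.symm he)]
      simp [he]

theorem countP_lt_succ {α : Type} (l : List α) (f : α → Nat) (j : Nat) :
    l.countP (fun p => decide (f p < j + 1))
      = l.countP (fun p => decide (f p < j)) + l.countP (fun p => decide (f p = j)) := by
  induction l with
  | nil => simp
  | cons a t ih =>
    have h3 : (decide (f a < j + 1)) = (decide (f a < j) || decide (f a = j)) := by
      by_cases h1 : f a < j <;> by_cases h2 : f a = j <;> simp [h1, h2] <;> omega
    simp only [List.countP_cons, ih, h3]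
    by_cases h1 : f a < j <;> by_cases h2 : f a = j <;> simp [h1, h2] <;> omega

-- prefix sums of the buckets count the pairs whose clamped time is below j
theorem cnt_prefix (pairs : List (Int × Int)) (n : Nat) : ∀ (j : Nat), j ≤ n →
    ((buildCnt pairs n).take j).sum
      = (pairs.countP (fun p => decide (clampB (ceilB p.1 p.2) n < j)) : Int) := by
  intro j
  induction j with
  | zero => intro _; simp
  | succ j ih =>
    intro hj
    have hj' : j ≤ n := by omega
    have hjlen : j < (buildCnt pairs n).length := by rw [buildCnt_length]; omega
    rw [List.take_add_one, List.sum_append, ih hj']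
    have : ((buildCnt pairs n)[j]?.toList).sum = (buildCnt pairs n).getD j 0 := by
      rw [List.getElem?_eq_getElem hjlen]; simp [List.getD_eq_getElem?_getD, List.getElem?_eq_getElem hjlen]
    rw [this]
    unfold buildCnt
    rw [buildCnt_getD_aux pairs n j hj' _ (by simp)]
    rw [countP_lt_succ pairs (fun p => clampB (ceilB p.1 p.2) n) j]
    push_cast
    simp

-- below the bucket cap, clamping does not change the ≤ j test
theorem count_le_eq (pairs : List (Int × Int)) (n j : Nat) (hj : j < n) :
    pairs.countP (fun p => decide (clampB (ceilB p.1 p.2) n < j + 1))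
      = pairs.countP (fun p => decide (ceilB p.1 p.2 ≤ (j : Int))) := by
  apply List.countP_congr
  intro a _
  have : (clampB (ceilB a.1 a.2) n < j + 1) ↔ (ceilB a.1 a.2 ≤ (j : Int)) := by
    unfold clampB; omega
  simp [this]

theorem PcP_iff (pairs : List (Int × Int)) (j : Nat) :
    PcP (pairs.map (fun p => ceilA p.1 p.2)) j
      ↔ (j : Int) < (pairs.countP (fun p => decide (ceilB p.1 p.2 ≤ (j : Int))) : Int) := by
  unfold PcP
  rw [List.countP_map]
  have : ((fun t => decide (t ≤ (j:Int))) ∘ (fun p : Int × Int => ceilA p.1 p.2))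
      = (fun p : Int × Int => decide (ceilB p.1 p.2 ≤ (j : Int))) := rfl
  rw [this]
  exact_mod_cast Iff.rfl

theorem sweep_isSpec (pairs : List (Int × Int)) (n : Nat) (hn : pairs.length = n) :
    ∀ (l : List Int) (j : Nat) (run : Int),
    l = ((buildCnt pairs n).take n).drop j →
    run = ((buildCnt pairs n).take j).sum →
    j ≤ n →
    (∀ i < j, ¬ PcP (pairs.map (fun p => ceilA p.1 p.2)) i) →
    IsSpec (pairs.map (fun p => ceilA p.1 p.2)) (sweep n l j run) := by
  have hcntlen : (buildCnt pairs n).length = n + 1 := buildCnt_length pairs n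
  have htklen : ((buildCnt pairs n).take n).length = n := by simp [hcntlen]
  have hts_len : (pairs.map (fun p => ceilA p.1 p.2)).length = n := by simp [hn]
  intro l
  induction l with
  | nil =>
    intro j run hl hrun hj hno
    have hjn : j = n := by
      have := congrArg List.length hl
      simp [htklen] at this
      omega
    subst hjn
    exact ⟨j, rfl, by omega, hno, by omega⟩
  | cons c rest ih =>
    intro j run hl hrun hj hno
    have hjn : j < n := by
      have := congrArg List.length hl
      simp [htklen] at this
      omega
    have hdrop : ((buildCnt pairs n).take n).drop j
        = ((buildCnt pairs n).take n)[j] :: ((buildCnt pairs n).take n).drop (j + 1) :=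
      List.drop_eq_getElem_cons (by omega)
    rw [hdrop] at hl
    have hc : c = ((buildCnt pairs n).take n)[j] := by
      exact (List.cons.injEq .. ▸ hl).1
    have hrest : rest = ((buildCnt pairs n).take n).drop (j + 1) := by
      exact (List.cons.injEq .. ▸ hl).2
    have hcj : ((buildCnt pairs n).take n)[j] = (buildCnt pairs n).getD j 0 := by
      rw [List.getElem_take]
      simp [List.getD_eq_getElem?_getD, List.getElem?_eq_getElem (by omega : j < (buildCnt pairs n).length)]
    have hsum1 : ((buildCnt pairs n).take (j + 1)).sum = run + c := by
      rw [List.take_add_one, List.sum_append, ← hrun]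
      have : ((buildCnt pairs n)[j]?.toList).sum = (buildCnt pairs n).getD j 0 := by
        rw [List.getElem?_eq_getElem (by omega)]
        simp [List.getD_eq_getElem?_getD, List.getElem?_eq_getElem (by omega : j < (buildCnt pairs n).length)]
      rw [this, hc, hcj]
    have hrun' : run + c = (pairs.countP (fun p => decide (ceilB p.1 p.2 ≤ (j : Int))) : Int) := by
      rw [← hsum1, cnt_prefix pairs n (j + 1) (by omega), count_le_eq pairs n j hjn]
    have hPc : PcP (pairs.map (fun p => ceilA p.1 p.2)) j ↔ (j : Int) < run + c := by
      rw [PcP_iff, hrun']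
    show IsSpec _ (if (j : Int) < run + c then (j : Int) else sweep n rest (j + 1) (run + c))
    by_cases hcl : (j : Int) < run + c
    · rw [if_pos hcl]
      exact ⟨j, rfl, by omega, hno, fun _ => hPc.mpr hcl⟩
    · rw [if_neg hcl]
      apply ih (j + 1) (run + c) hrest (by rw [hsum1]) (by omega)
      intro i hi
      rcases Nat.lt_or_ge i j with hlt | hge
      · exact hno i hlt
      · have : i = j := by omega
        subst this
        exact fun hp => hcl (hPc.mp hp)

theorem B_isSpec (sh dr : List Int) (hlen : sh.length ≤ dr.length) :
    IsSpec ((sh.zip dr).map (fun p => ceilA p.1 p.2)) (maxPlanes_alt sh dr) := by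
  have hn : (sh.zip dr).length = sh.length := by simp [List.length_zip]; omega
  unfold maxPlanes_alt
  apply sweep_isSpec (sh.zip dr) sh.length hn
  · simp
  · simp
  · omega
  · intro i hi; omega

-- ===== VERDICT (by name: the statement is the Claim_ definition above) =====
theorem maxPlanes_spec : Claim_equal_maxPlanes := by
  intro sh dr _ hpre
  unfold Spec_maxPlanes maxPlanes
  rw [timesA_eq sh dr hpre.1]
  exact IsSpec_unique (A_isSpec _) (B_isSpec sh dr hpre.1)
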